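-- pv_equiv track=rewrite | github.com/Johnwang688/bible-app | app/services/summary_entity_service.py | parse_summary_themes_people
-- ===== SOURCE A (Python) =====
-- def parse_summary_themes_people(content: str) -> tuple[list[str], list[str]]:
--     """Match frontend parseSummaryContent: Themes / Key People lines, split on ' · '."""
--     themes: list[str] = []
--     people: list[str] = []
--     for line in content.splitlines():
--         if line.startswith("Themes:"):
--             rest = line[len("Themes:") :].strip()
--             if rest:
--                 themes = [s.strip() for s in rest.split(" · ") if s.strip()]
--         elif line.startswith("Key People:"):
--             rest = line[len("Key People:") :].strip()
--             if rest:
--                 people = [s.strip() for s in rest.split(" · ") if s.strip()]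
--     return themes, people
-- ===== SOURCE B (Python) =====
-- def _extract_field(prefix: str, content: str) -> list[str]:
--     last = None
--     for line in content.splitlines():
--         if line.startswith(prefix):
--             rest = line[len(prefix):].strip()
--             if rest:
--                 last = rest
--     if last is None:
--         return []
--     return [p for p in (s.strip() for s in last.split(' · ')) if p]
--
--
-- def parse_summary_themes_people(content: str) -> tuple[list[str], list[str]]:
--     return _extract_field("Themes:", content), _extract_field("Key People:", content)
-- ===== Notes on version B (the rewrite author's own statement) =====
-- stated objective: simpler
-- what changed: Replaces the interleaved two-state loop with a single generic field extractor (scan for the last line with the given prefix and non-empty remainder, then split) called once per prefix.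
import Mathlib
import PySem

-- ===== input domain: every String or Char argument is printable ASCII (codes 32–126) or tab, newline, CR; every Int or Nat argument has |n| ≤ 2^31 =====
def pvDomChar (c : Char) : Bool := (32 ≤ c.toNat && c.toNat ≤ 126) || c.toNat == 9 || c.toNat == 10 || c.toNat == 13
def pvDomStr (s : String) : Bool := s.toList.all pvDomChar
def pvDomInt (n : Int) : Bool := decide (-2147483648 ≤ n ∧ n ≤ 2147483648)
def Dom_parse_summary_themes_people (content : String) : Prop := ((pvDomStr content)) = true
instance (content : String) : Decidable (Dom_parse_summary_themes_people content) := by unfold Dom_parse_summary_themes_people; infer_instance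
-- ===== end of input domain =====

-- B replaces A's interleaved two-state loop with one generic field extractor called once per prefix (objective: simpler decomposition).

-- ===== PORT A =====
def parse_summary_themes_people (content : String) : List String × List String :=
  (PySem.Str.splitlines content).foldl
    (fun (acc : List String × List String) line =>
      if PySem.Str.startswith line "Themes:" then
        let rest := PySem.Str.strip (PySem.Str.slice line (some 7) none)
        if rest ≠ "" then
          ((((PySem.Str.split? rest " · ").getD []).filter (fun s => !(PySem.Str.strip s == ""))).map PySem.Str.strip, acc.2)
        else acc
      else if PySem.Str.startswith line "Key People:" then
        let rest := PySem.Str.strip (PySem.Str.slice line (some 11) none)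
        if rest ≠ "" then
          (acc.1, (((PySem.Str.split? rest " · ").getD []).filter (fun s => !(PySem.Str.strip s == ""))).map PySem.Str.strip)
        else acc
      else acc)
    ([], [])

-- ===== PORT B =====
-- helper for B: split the last non-empty stripped remainder of a line starting with `pre` on " · "
def pvExtractField (pre : String) (content : String) : List String :=
  match (PySem.Str.splitlines content).foldl
      (fun (acc : Option String) line =>
        if PySem.Str.startswith line pre then
          let rest := PySem.Str.strip (PySem.Str.slice line (some (PySem.Str.len pre : Int)) none)
          if rest ≠ "" then some rest else acc
        else acc)
      none with
  | none => []
  | some rest => (((PySem.Str.split? rest " · ").getD []).map PySem.Str.strip).filter (fun p => !(p == ""))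

def parse_summary_themes_people_alt (content : String) : List String × List String :=
  (pvExtractField "Themes:" content, pvExtractField "Key People:" content)

-- ===== PRECONDITION & SPEC =====
def Spec_parse_summary_themes_people (content : String) (out : List String × List String) : Prop := out = parse_summary_themes_people_alt content
instance (content : String) (out : List String × List String) : Decidable (Spec_parse_summary_themes_people content out) := by unfold Spec_parse_summary_themes_people; infer_instance

-- ===== CLAIM (what is proved, stated in full; the proofs are below) =====
def Claim_equal_parse_summary_themes_people : Prop := ∀ (content : String), Dom_parse_summary_themes_people content → Spec_parse_summary_themes_people content (parse_summary_themes_people content)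

-- ===== LEMMAS AND PROOFS =====

-- proof-side abbreviations (definitionally equal to the loop bodies of the two ports)
def pvParse (rest : String) : List String :=
  (((PySem.Str.split? rest " · ").getD []).map PySem.Str.strip).filter (fun p => !(p == ""))

def pvStepA (acc : List String × List String) (line : String) : List String × List String :=
  if PySem.Str.startswith line "Themes:" then
    if PySem.Str.strip (PySem.Str.slice line (some 7) none) ≠ "" then
      ((((PySem.Str.split? (PySem.Str.strip (PySem.Str.slice line (some 7) none)) " · ").getD []).filter
          (fun s => !(PySem.Str.strip s == ""))).map PySem.Str.strip, acc.2)
    else acc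
  else if PySem.Str.startswith line "Key People:" then
    if PySem.Str.strip (PySem.Str.slice line (some 11) none) ≠ "" then
      (acc.1, (((PySem.Str.split? (PySem.Str.strip (PySem.Str.slice line (some 11) none)) " · ").getD []).filter
          (fun s => !(PySem.Str.strip s == ""))).map PySem.Str.strip)
    else acc
  else acc

def pvStepB (pre : String) (acc : Option String) (line : String) : Option String :=
  if PySem.Str.startswith line pre then
    if PySem.Str.strip (PySem.Str.slice line (some (PySem.Str.len pre : Int)) none) ≠ "" then
      some (PySem.Str.strip (PySem.Str.slice line (some (PySem.Str.len pre : Int)) none))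
    else acc
  else acc

lemma pvFilterMap (l : List String) :
    (l.filter (fun s => !(PySem.Str.strip s == ""))).map PySem.Str.strip
      = (l.map PySem.Str.strip).filter (fun p => !(p == "")) := by
  induction l with
  | nil => rfl
  | cons x xs ih =>
    cases h : (PySem.Str.strip x == "") <;>
      simp [List.map_cons, h, ih]

lemma pvStepA_fst (acc : List String × List String) (line : String) :
    (pvStepA acc line).1
      = match pvStepB "Themes:" none line with
        | some r => pvParse r
        | none => acc.1 := by
  unfold pvStepA pvStepB pvParse
  have hL : ((PySem.Str.len "Themes:" : Int)) = 7 := by decide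
  rw [hL]
  by_cases h1 : PySem.Str.startswith line "Themes:" = true
  · rw [if_pos h1, if_pos h1]
    by_cases h2 : PySem.Str.strip (PySem.Str.slice line (some 7) none) = ""
    · rw [if_neg (not_not_intro h2), if_neg (not_not_intro h2)]
    · rw [if_pos h2, if_pos h2, pvFilterMap]
  · rw [if_neg h1, if_neg h1]
    by_cases h3 : PySem.Str.startswith line "Key People:" = true
    · rw [if_pos h3]
      by_cases h4 : PySem.Str.strip (PySem.Str.slice line (some 11) none) = ""
      · rw [if_neg (not_not_intro h4)]
      · rw [if_pos h4]
    · rw [if_neg h3]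

lemma pvStepA_snd (acc : List String × List String) (line : String) :
    (pvStepA acc line).2
      = match pvStepB "Key People:" none line with
        | some r => pvParse r
        | none => acc.2 := by
  unfold pvStepA pvStepB pvParse
  have hL : ((PySem.Str.len "Key People:" : Int)) = 11 := by decide
  rw [hL]
  by_cases h1 : PySem.Str.startswith line "Themes:" = true
  · have h3 : PySem.Str.startswith line "Key People:" = false := by
      by_contra hk
      rw [Bool.not_eq_false] at hk
      rw [PySem.Str.startswith_eq, PySem.Chars.startswith_iff] at h1 hk
      rcases List.prefix_or_prefix_of_prefix h1 hk with hp | hp <;> revert hp <;> decide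
    rw [if_pos h1, h3, if_neg (by simp : ¬(false = true))]
    by_cases h2 : PySem.Str.strip (PySem.Str.slice line (some 7) none) = ""
    · rw [if_neg (not_not_intro h2)]
    · rw [if_pos h2]
  · rw [if_neg h1]
    by_cases h3 : PySem.Str.startswith line "Key People:" = true
    · rw [if_pos h3, if_pos h3]
      by_cases h4 : PySem.Str.strip (PySem.Str.slice line (some 11) none) = ""
      · rw [if_neg (not_not_intro h4), if_neg (not_not_intro h4)]
      · rw [if_pos h4, if_pos h4, pvFilterMap]
    · rw [if_neg h3, if_neg h3]

lemma pvStepB_restart (pre : String) (lines : List String) (o : Option String) :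
    lines.foldl (pvStepB pre) o
      = match lines.foldl (pvStepB pre) none with
        | some r => some r
        | none => o := by
  induction lines generalizing o with
  | nil => rfl
  | cons line ls ih =>
    simp only [List.foldl]
    rw [ih (pvStepB pre o line), ih (pvStepB pre none line)]
    cases hF : ls.foldl (pvStepB pre) none with
    | some r => rfl
    | none =>
      show pvStepB pre o line = match pvStepB pre none line with
        | some r => some r
        | none => o
      unfold pvStepB
      by_cases h1 : PySem.Str.startswith line pre = true
      · rw [if_pos h1, if_pos h1]
        by_cases h2 : PySem.Str.strip (PySem.Str.slice line (some (PySem.Str.len pre : Int)) none) = ""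
        · rw [if_neg (not_not_intro h2), if_neg (not_not_intro h2)]
        · rw [if_pos h2, if_pos h2]
      · rw [if_neg h1, if_neg h1]

lemma pvFstChar (lines : List String) (acc : List String × List String) :
    (lines.foldl pvStepA acc).1
      = match lines.foldl (pvStepB "Themes:") none with
        | some r => pvParse r
        | none => acc.1 := by
  induction lines generalizing acc with
  | nil => rfl
  | cons line ls ih =>
    simp only [List.foldl]
    rw [ih, pvStepB_restart "Themes:" ls (pvStepB "Themes:" none line)]
    cases hF : ls.foldl (pvStepB "Themes:") none with
    | some r => rfl
    | none => exact pvStepA_fst acc line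

lemma pvSndChar (lines : List String) (acc : List String × List String) :
    (lines.foldl pvStepA acc).2
      = match lines.foldl (pvStepB "Key People:") none with
        | some r => pvParse r
        | none => acc.2 := by
  induction lines generalizing acc with
  | nil => rfl
  | cons line ls ih =>
    simp only [List.foldl]
    rw [ih, pvStepB_restart "Key People:" ls (pvStepB "Key People:" none line)]
    cases hF : ls.foldl (pvStepB "Key People:") none with
    | some r => rfl
    | none => exact pvStepA_snd acc line

-- ===== VERDICT (by name: the statement is the Claim_ definition above) =====
theorem parse_summary_themes_people_spec : Claim_equal_parse_summary_themes_people := by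
  intro content _
  show parse_summary_themes_people content = parse_summary_themes_people_alt content
  have hA : parse_summary_themes_people content
      = (PySem.Str.splitlines content).foldl pvStepA ([], []) := rfl
  have hB : ∀ pre, pvExtractField pre content
      = match (PySem.Str.splitlines content).foldl (pvStepB pre) none with
        | none => []
        | some rest => pvParse rest := fun _ => rfl
  rw [hA]
  show _ = (pvExtractField "Themes:" content, pvExtractField "Key People:" content)
  rw [hB "Themes:", hB "Key People:"]
  refine Prod.ext ?_ ?_
  · rw [pvFstChar]
    cases (PySem.Str.splitlines content).foldl (pvStepB "Themes:") none <;> rfl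
  · rw [pvSndChar]
    cases (PySem.Str.splitlines content).foldl (pvStepB "Key People:") none <;> rfl
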